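-- pv_equiv track=rewrite | github.com/yingqichao/Robust-Watermarking-in-JSON-and-Excel | Util.py | toTreeMap
-- ===== SOURCE A (Python) =====
-- from heapq import heappush,heappop
-- from collections import OrderedDict
--
-- def toTreeMap(paramMap):
--     "将paramMap转换为java中的treeMap形式.将map的keys变为heapq.创建有序字典."
--     keys=paramMap.keys()
--     heap=[]
--     for item in keys:
--         heappush(heap,item)
--
--     sort=[]
--     while heap:
--         sort.append(heappop(heap))
--
--     resMap=OrderedDict()
--     for key in sort:
--         resMap[key]=paramMap.get(key)
--
--     return resMap
-- ===== SOURCE B (Python) =====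
-- from collections import OrderedDict
--
-- def toTreeMap(paramMap):
--     "Same result as A: an OrderedDict of paramMap's entries with keys in sorted order."
--     return OrderedDict((k, paramMap.get(k)) for k in sorted(paramMap))
-- ===== Notes on version B (the rewrite author's own statement) =====
-- stated objective: simpler
-- what changed: Replaces the heapq-based heapsort (a push loop, a pop loop, then a build loop) by one builtin sorted() over the keys and a single generator-built OrderedDict.
import Mathlib
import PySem

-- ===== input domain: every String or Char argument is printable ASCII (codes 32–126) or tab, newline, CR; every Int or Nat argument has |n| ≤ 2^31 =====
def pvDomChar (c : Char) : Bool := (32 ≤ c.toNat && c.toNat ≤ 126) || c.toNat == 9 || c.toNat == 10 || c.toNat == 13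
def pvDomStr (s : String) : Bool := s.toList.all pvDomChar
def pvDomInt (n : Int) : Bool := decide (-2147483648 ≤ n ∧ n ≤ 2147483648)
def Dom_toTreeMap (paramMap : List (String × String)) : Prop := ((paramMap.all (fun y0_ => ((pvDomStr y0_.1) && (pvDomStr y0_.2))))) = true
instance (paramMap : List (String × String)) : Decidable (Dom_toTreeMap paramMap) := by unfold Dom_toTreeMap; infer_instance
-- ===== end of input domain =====

-- B replaces A's heapq heapsort of the keys (push loop + pop loop + build loop) by one
-- builtin sort of the keys and a single build pass; same return value.

-- ===== PORT A =====
-- CPython's heapq is pure Python; heappush/heappop and their helpers _siftdown/_siftup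
-- are transliterated below step for step (heap entries are the dict keys: Strings).
-- List reads heap[i] are ported as getD i "" — every read in these algorithms is in range.

def hget (h : List String) (i : Nat) : String := h.getD i ""

-- heapq._siftdown(heap, startpos, pos) after 'newitem = heap[pos]' was read
-- (fuel only makes the recursion structural; a call with fuel = pos never runs out,
-- since pos strictly decreases on every iteration)
def siftdownLoop : Nat → List String → Nat → Nat → String → List String
  | 0, h, _, pos, newitem => h.set pos newitem
  | fuel + 1, h, startpos, pos, newitem =>
    if startpos < pos then
      -- parentpos = (pos - 1) >> 1; parent = heap[parentpos]
      if newitem < hget h ((pos - 1) / 2) then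
        siftdownLoop fuel (h.set pos (hget h ((pos - 1) / 2))) startpos ((pos - 1) / 2) newitem
      else h.set pos newitem
    else h.set pos newitem

-- heapq.heappush: heap.append(item); _siftdown(heap, 0, len(heap)-1)
def heappush (h : List String) (item : String) : List String :=
  siftdownLoop ((h ++ [item]).length - 1) (h ++ [item]) 0 ((h ++ [item]).length - 1) item

-- the 'childpos = rightpos' update of heapq._siftup: index of the smaller child
def minChild (h : List String) (endpos childpos : Nat) : Nat :=
  if childpos + 1 < endpos ∧ ¬ hget h childpos < hget h (childpos + 1)
  then childpos + 1 else childpos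

-- the while-loop of heapq._siftup ('while childpos < endpos'); fuel = endpos suffices,
-- childpos strictly increases on every iteration
def siftupLoop : Nat → List String → Nat → Nat → Nat → List String × Nat
  | 0, h, _, pos, _ => (h, pos)
  | fuel + 1, h, endpos, pos, childpos =>
    if childpos < endpos then
      siftupLoop fuel (h.set pos (hget h (minChild h endpos childpos))) endpos
        (minChild h endpos childpos) (2 * minChild h endpos childpos + 1)
    else (h, pos)

-- heapq._siftup
def siftup (h : List String) (pos : Nat) : List String :=
  let endpos := h.length
  let startpos := pos
  let newitem := hget h pos
  let r := siftupLoop h.length h endpos pos (2 * pos + 1)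
  siftdownLoop r.2 (r.1.set r.2 newitem) startpos r.2 newitem

-- heapq.heappop (A only calls it on a nonempty heap)
def heappop (h : List String) : String × List String :=
  if h.dropLast.isEmpty then (hget h (h.length - 1), h.dropLast)
  else (hget h.dropLast 0, siftup (h.dropLast.set 0 (hget h (h.length - 1))) 0)

-- the 'while heap: sort.append(heappop(heap))' loop
-- the 'while heap: sort.append(heappop(heap))' loop; fuel = len(heap) is exact,
-- each pop removes one element
def popAll : Nat → List String → List String
  | 0, _ => []
  | fuel + 1, h => if h.isEmpty then [] else (heappop h).1 :: popAll fuel (heappop h).2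

def toTreeMap (paramMap : List (String × String)) : List (String × String) :=
  let d := PySem.Dict.mk paramMap
  let keys := d.keys
  let heap := keys.foldl (fun hp item => heappush hp item) []
  let sort := popAll heap.length heap
  -- resMap[key] = paramMap.get(key); every key is present, so .get(key) is the value: getD key ""
  let resMap := sort.foldl (fun r key => r.insert key (d.getD key "")) PySem.Dict.empty
  resMap.items

-- ===== PORT B =====
def toTreeMap_alt (paramMap : List (String × String)) : List (String × String) :=
  let d := PySem.Dict.mk paramMap
  -- OrderedDict((k, paramMap.get(k)) for k in sorted(paramMap)): the sorted keys are
  -- distinct, so the built dict's item list is exactly the generator's pairs in order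
  (PySem.List.sorted d.keys (fun k => k) false).map (fun k => (k, d.getD k ""))

-- ===== PRECONDITION & SPEC =====
-- Pre_ excludes association lists with duplicate keys: they correspond to no Python dict
-- (A's parameter is a dict, whose keys are necessarily distinct).
def Pre_toTreeMap (paramMap : List (String × String)) : Prop :=
  (paramMap.map Prod.fst).Nodup
instance (paramMap : List (String × String)) : Decidable (Pre_toTreeMap paramMap) := by
  unfold Pre_toTreeMap; infer_instance

def pvWitness_toTreeMap : (List (String × String)) := [("b", "2"), ("a", "1"), ("c", "3")]

def Spec_toTreeMap (paramMap : List (String × String)) (out : List (String × String)) : Prop := out = toTreeMap_alt paramMap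
instance (paramMap : List (String × String)) (out : List (String × String)) : Decidable (Spec_toTreeMap paramMap out) := by unfold Spec_toTreeMap; infer_instance

-- ===== CLAIM (what is proved, stated in full; the proofs are below) =====
def Claim_equal_toTreeMap : Prop := ∀ (paramMap : List (String × String)), Dom_toTreeMap paramMap → Pre_toTreeMap paramMap → Spec_toTreeMap paramMap (toTreeMap paramMap)

-- ===== LEMMAS AND PROOFS =====

-- length preservation of the sift operations
theorem length_siftdownLoop (f : Nat) : ∀ (h : List String) (s p : Nat) (x : String),
    (siftdownLoop f h s p x).length = h.length := by
  induction f with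
  | zero => intro h s p x; simp [siftdownLoop]
  | succ f ih =>
    intro h s p x
    simp only [siftdownLoop]
    split_ifs <;> simp [ih]

theorem length_siftupLoop (f : Nat) : ∀ (h : List String) (e p c : Nat),
    (siftupLoop f h e p c).1.length = h.length := by
  induction f with
  | zero => intro h e p c; simp [siftupLoop]
  | succ f ih =>
    intro h e p c
    simp only [siftupLoop]
    split_ifs <;> simp [ih]

theorem length_siftup (h : List String) (p : Nat) : (siftup h p).length = h.length := by
  simp [siftup, length_siftdownLoop, length_siftupLoop]

theorem length_heappop (h : List String) (hne : ¬ h.isEmpty) :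
    (heappop h).2.length + 1 = h.length := by
  have hl : 1 ≤ h.length := by cases h <;> simp_all
  unfold heappop
  split <;> simp [length_siftup, List.length_dropLast] <;> omega


-- j is a child of i in the implicit binary-heap tree
def isChild (i j : Nat) : Prop := j = 2 * i + 1 ∨ j = 2 * i + 2

def heapProp (h : List String) : Prop :=
  ∀ i j, isChild i j → j < h.length → hget h i ≤ hget h j

theorem hget_set_self (h : List String) (i : Nat) (v : String) (hi : i < h.length) :
    hget (h.set i v) i = v := by
  simp [hget, List.getD_eq_getElem?_getD, hi]

theorem hget_set_ne (h : List String) (i k : Nat) (v : String) (hk : k ≠ i) :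
    hget (h.set i v) k = hget h k := by
  simp [hget, List.getD_eq_getElem?_getD, List.getElem?_set_ne (Ne.symm hk)]

-- replacing position k by y after saving h[k] in front is a permutation of y placed at k
theorem cons_getD_set_perm (t : List String) (k : Nat) (y : String) (hk : k < t.length) :
    (t.getD k "" :: t.set k y).Perm (y :: t) := by
  induction t generalizing k with
  | nil => simp at hk
  | cons a t ih =>
    cases k with
    | zero => simpa using List.Perm.swap y a t
    | succ k =>
      simp only [List.getD_cons_succ, List.set_cons_succ]
      refine ((List.Perm.swap _ _ _).trans ?_).trans (List.Perm.swap _ _ _)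
      exact (ih k (by simpa using hk)).cons a

-- y :: (t with a written at i)  ~  a :: (t with y written at i)
theorem head_set_swap_perm (t : List String) (i : Nat) (a y : String) (hi : i < t.length) :
    (y :: t.set i a).Perm (a :: t.set i y) := by
  induction t generalizing i with
  | nil => simp at hi
  | cons b t ih =>
    cases i with
    | zero => simpa using List.Perm.swap a y t
    | succ i =>
      simp only [List.set_cons_succ]
      refine ((List.Perm.swap _ _ _).trans ?_).trans (List.Perm.swap _ _ _)
      exact (ih i (by simpa using hi)).cons b

-- swapping the contents of two positions is a permutation
theorem set_set_perm (l : List String) (i j : Nat) (y : String)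
    (hi : i < l.length) (hj : j < l.length) (hij : i ≠ j) :
    ((l.set i (l.getD j "")).set j y).Perm (l.set i y) := by
  induction l generalizing i j with
  | nil => simp at hi
  | cons a t ih =>
    cases i with
    | zero =>
      cases j with
      | zero => exact absurd rfl hij
      | succ j =>
        simp only [List.getD_cons_succ, List.set_cons_zero, List.set_cons_succ]
        exact cons_getD_set_perm t j y (by simpa using hj)
    | succ i =>
      cases j with
      | zero =>
        simp only [List.getD_cons_zero, List.set_cons_succ, List.set_cons_zero]
        exact head_set_swap_perm t i a y (by simpa using hi)
      | succ j =>
        simp only [List.getD_cons_succ, List.set_cons_succ]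
        exact (ih i j (by simpa using hi) (by simpa using hj) (by omega)).cons a

theorem heap_root_le (h : List String) (hp : heapProp h) :
    ∀ j, j < h.length → hget h 0 ≤ hget h j := by
  intro j
  induction j using Nat.strong_induction_on with
  | _ j ih =>
    intro hj
    cases j with
    | zero => exact le_refl _
    | succ j =>
      have hchild : isChild ((j + 1 - 1) / 2) (j + 1) := by unfold isChild; omega
      exact le_trans (ih _ (by omega) (by omega)) (hp _ _ hchild hj)

theorem siftdownLoop_spec (x : String) : ∀ (fuel : Nat) (h : List String) (pos : Nat),
    pos ≤ fuel → pos < h.length →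
    (∀ i j, isChild i j → j < h.length → j ≠ pos →
      hget (h.set pos x) i ≤ hget (h.set pos x) j) →
    (0 < pos → ∀ c, isChild pos c → c < h.length →
      hget h ((pos - 1) / 2) ≤ hget h c) →
    heapProp (siftdownLoop fuel h 0 pos x) ∧
      (siftdownLoop fuel h 0 pos x).Perm (h.set pos x) := by
  intro fuel
  induction fuel with
  | zero =>
    intro h pos hf hlen hex hgp
    have hp0 : pos = 0 := by omega
    subst hp0
    simp only [siftdownLoop]
    refine ⟨?_, List.Perm.refl _⟩
    intro i j hc hj
    rw [List.length_set] at hj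
    have hjpos : j ≠ 0 := by unfold isChild at hc; omega
    exact hex i j hc hj hjpos
  | succ fuel ih =>
    intro h pos hf hlen hex hgp
    simp only [siftdownLoop]
    split_ifs with h0 hlt
    · -- 0 < pos and x < parent: shift the parent down and recurse at parentpos
      have hLp : (pos - 1) / 2 < h.length := by omega
      have hne1 : (pos - 1) / 2 ≠ pos := by omega
      have hex₂ : ∀ i j, isChild i j → j < (h.set pos (hget h ((pos - 1) / 2))).length →
          j ≠ (pos - 1) / 2 →
          hget ((h.set pos (hget h ((pos - 1) / 2))).set ((pos - 1) / 2) x) i ≤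
          hget ((h.set pos (hget h ((pos - 1) / 2))).set ((pos - 1) / 2) x) j := by
        intro i j hc hj hjp
        rw [List.length_set] at hj
        have hij : i = (j - 1) / 2 := by unfold isChild at hc; omega
        by_cases hjpos : j = pos
        · have hip : i = (pos - 1) / 2 := by omega
          subst hip hjpos
          rw [hget_set_self _ _ _ (by rw [List.length_set]; exact hLp),
            hget_set_ne _ _ _ _ (Ne.symm hne1), hget_set_self _ _ _ hlen]
          exact le_of_lt hlt
        · have hgj : hget ((h.set pos (hget h ((pos - 1) / 2))).set ((pos - 1) / 2) x) j
              = hget h j := by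
            rw [hget_set_ne _ _ _ _ hjp, hget_set_ne _ _ _ _ hjpos]
          by_cases hip : i = (pos - 1) / 2
          · subst hip
            rw [hget_set_self _ _ _ (by rw [List.length_set]; exact hLp), hgj]
            have h1 := hex ((pos - 1) / 2) j hc hj hjpos
            rw [hget_set_ne _ _ _ _ hne1, hget_set_ne _ _ _ _ hjpos] at h1
            exact le_trans (le_of_lt hlt) h1
          · by_cases hipos : i = pos
            · subst hipos
              rw [hget_set_ne _ _ _ _ hip, hget_set_self _ _ _ hlen, hgj]
              exact hgp h0 j hc hj
            · rw [hget_set_ne _ _ _ _ hip, hget_set_ne _ _ _ _ hipos, hgj]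
              have h1 := hex i j hc hj hjpos
              rw [hget_set_ne _ _ _ _ hipos, hget_set_ne _ _ _ _ hjpos] at h1
              exact h1
      have hgp₂ : 0 < (pos - 1) / 2 → ∀ c, isChild ((pos - 1) / 2) c →
          c < (h.set pos (hget h ((pos - 1) / 2))).length →
          hget (h.set pos (hget h ((pos - 1) / 2))) (((pos - 1) / 2 - 1) / 2) ≤
          hget (h.set pos (hget h ((pos - 1) / 2))) c := by
        intro hp0 c hc hcl
        rw [List.length_set] at hcl
        have hppne : ((pos - 1) / 2 - 1) / 2 ≠ pos := by omega
        rw [hget_set_ne _ _ _ _ hppne]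
        have h1 : hget h (((pos - 1) / 2 - 1) / 2) ≤ hget h ((pos - 1) / 2) := by
          have := hex (((pos - 1) / 2 - 1) / 2) ((pos - 1) / 2)
            (by unfold isChild; omega) (by omega) hne1
          rwa [hget_set_ne _ _ _ _ hppne, hget_set_ne _ _ _ _ hne1] at this
        by_cases hcpos : c = pos
        · subst hcpos; rw [hget_set_self _ _ _ hlen]; exact h1
        · rw [hget_set_ne _ _ _ _ hcpos]
          have h2 : hget h ((pos - 1) / 2) ≤ hget h c := by
            have := hex ((pos - 1) / 2) c hc hcl hcpos
            rwa [hget_set_ne _ _ _ _ hne1, hget_set_ne _ _ _ _ hcpos] at this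
          exact le_trans h1 h2
      obtain ⟨hH, hP⟩ := ih (h.set pos (hget h ((pos - 1) / 2))) ((pos - 1) / 2)
        (by omega) (by rw [List.length_set]; exact hLp) hex₂ hgp₂
      refine ⟨hH, hP.trans ?_⟩
      exact set_set_perm h pos ((pos - 1) / 2) x hlen hLp (Ne.symm hne1)
    · -- 0 < pos and parent ≤ x: place x at pos; the heap is restored
      refine ⟨?_, List.Perm.refl _⟩
      intro i j hc hj
      rw [List.length_set] at hj
      by_cases hjpos : j = pos
      · have hip : i = (pos - 1) / 2 := by unfold isChild at hc; omega
        subst hip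
        rw [hjpos, hget_set_ne _ _ _ _ (by omega : (pos - 1) / 2 ≠ pos), hget_set_self _ _ _ hlen]
        exact not_lt.mp hlt
      · exact hex i j hc hj hjpos
    · -- pos = 0: place x at the root
      refine ⟨?_, List.Perm.refl _⟩
      intro i j hc hj
      rw [List.length_set] at hj
      have hjpos : j ≠ pos := by unfold isChild at hc; omega
      exact hex i j hc hj hjpos

theorem hget_append (h t : List String) (k : Nat) (hk : k < h.length) :
    hget (h ++ t) k = hget h k := by
  simp [hget, List.getD_eq_getElem?_getD, List.getElem?_append_left hk]

theorem set_append_last (h : List String) (x y : String) :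
    (h ++ [x]).set h.length y = h ++ [y] := by
  induction h with
  | nil => rfl
  | cons a t ih => simp [ih]

theorem heappush_spec (h : List String) (x : String) (hp : heapProp h) :
    heapProp (heappush h x) ∧ (heappush h x).Perm (h ++ [x]) := by
  unfold heappush
  have hl : (h ++ [x]).length - 1 = h.length := by simp
  rw [hl]
  have hex : ∀ i j, isChild i j → j < (h ++ [x]).length → j ≠ h.length →
      hget ((h ++ [x]).set h.length x) i ≤ hget ((h ++ [x]).set h.length x) j := by
    intro i j hc hj hjne
    rw [set_append_last]
    have hj' : j < h.length := by simp at hj; omega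
    have hij : i < j := by unfold isChild at hc; omega
    rw [hget_append _ _ _ (by omega), hget_append _ _ _ hj']
    exact hp i j hc hj'
  have hgp : 0 < h.length → ∀ c, isChild h.length c → c < (h ++ [x]).length →
      hget (h ++ [x]) ((h.length - 1) / 2) ≤ hget (h ++ [x]) c := by
    intro _ c hc hcl
    unfold isChild at hc
    simp at hcl
    omega
  obtain ⟨h1, h2⟩ := siftdownLoop_spec x h.length (h ++ [x]) h.length (le_refl _)
    (by simp) hex hgp
  rw [set_append_last] at h2
  exact ⟨h1, h2⟩

theorem siftupLoop_spec : ∀ (fuel : Nat) (h : List String) (pos c : Nat),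
    h.length - c ≤ fuel → pos < h.length → c = 2 * pos + 1 →
    (∀ i j, isChild i j → j < h.length → i ≠ pos → hget h i ≤ hget h j) →
    (0 < pos → ∀ d, isChild pos d → d < h.length → hget h ((pos - 1) / 2) ≤ hget h d) →
    (siftupLoop fuel h h.length pos c).1.length = h.length ∧
    (siftupLoop fuel h h.length pos c).2 < h.length ∧
    h.length ≤ 2 * (siftupLoop fuel h h.length pos c).2 + 1 ∧
    (∀ i j, isChild i j → j < h.length → i ≠ (siftupLoop fuel h h.length pos c).2 →
      hget (siftupLoop fuel h h.length pos c).1 i ≤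
        hget (siftupLoop fuel h h.length pos c).1 j) ∧
    (∀ y, ((siftupLoop fuel h h.length pos c).1.set
      (siftupLoop fuel h h.length pos c).2 y).Perm (h.set pos y)) := by
  intro fuel
  induction fuel with
  | zero =>
    intro h pos c hn hlen hc ha hb
    exact ⟨rfl, hlen, by show h.length ≤ 2 * pos + 1; omega,
      fun i j hcij hj hip => ha i j hcij hj hip, fun y => List.Perm.refl _⟩
  | succ fuel ih =>
    intro h pos c hn hlen hc ha hb
    simp only [siftupLoop]
    split_ifs with hcl
    · -- step: move the smaller child into the hole and descend
      have hmr : minChild h h.length c = c ∨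
          (minChild h h.length c = c + 1 ∧ c + 1 < h.length) := by
        unfold minChild
        split_ifs with hmc
        · exact Or.inr ⟨rfl, hmc.1⟩
        · exact Or.inl rfl
      have hc'lt : minChild h h.length c < h.length := by omega
      have hposc : pos < minChild h h.length c := by omega
      have hchild : isChild pos (minChild h h.length c) := by unfold isChild; omega
      have hmin : ∀ j, isChild pos j → j < h.length →
          hget h (minChild h h.length c) ≤ hget h j := by
        intro j hcj hj
        have hjc : j = c ∨ j = c + 1 := by unfold isChild at hcj; omega
        unfold minChild
        split_ifs with hmc
        · rcases hjc with rfl | rfl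
          · exact not_lt.mp hmc.2
          · exact le_refl _
        · rcases hjc with rfl | rfl
          · exact le_refl _
          · rw [Classical.not_and_iff_not_or_not, not_not] at hmc
            rcases hmc with hbad | hlt
            · omega
            · exact le_of_lt hlt
      have ha' : ∀ i j, isChild i j → j < (h.set pos (hget h (minChild h h.length c))).length →
          i ≠ minChild h h.length c →
          hget (h.set pos (hget h (minChild h h.length c))) i ≤
          hget (h.set pos (hget h (minChild h h.length c))) j := by
        intro i j hcij hj hic
        rw [List.length_set] at hj
        by_cases hipos : i = pos
        · subst hipos
          have hjne : j ≠ i := by unfold isChild at hcij; omega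
          rw [hget_set_self _ _ _ hlen, hget_set_ne _ _ _ _ hjne]
          exact hmin j hcij hj
        · by_cases hjpos : j = pos
          · have hpos0 : 0 < pos := by unfold isChild at hcij; omega
            have hipar : i = (pos - 1) / 2 := by unfold isChild at hcij; omega
            rw [hget_set_ne _ _ _ _ hipos, hjpos, hget_set_self _ _ _ hlen, hipar]
            exact hb hpos0 (minChild h h.length c) hchild hc'lt
          · rw [hget_set_ne _ _ _ _ hipos, hget_set_ne _ _ _ _ hjpos]
            exact ha i j hcij hj hipos
      have hb' : 0 < minChild h h.length c → ∀ d, isChild (minChild h h.length c) d →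
          d < (h.set pos (hget h (minChild h h.length c))).length →
          hget (h.set pos (hget h (minChild h h.length c)))
            ((minChild h h.length c - 1) / 2) ≤
          hget (h.set pos (hget h (minChild h h.length c))) d := by
        intro _ d hcd hd
        rw [List.length_set] at hd
        have hpar : (minChild h h.length c - 1) / 2 = pos := by omega
        have hdne : d ≠ pos := by unfold isChild at hcd; omega
        have hdnec : minChild h h.length c ≠ pos := by omega
        rw [hpar, hget_set_self _ _ _ hlen, hget_set_ne _ _ _ _ hdne]
        exact ha (minChild h h.length c) d hcd hd (by omega)
      have hmeas : (h.set pos (hget h (minChild h h.length c))).length -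
          (2 * minChild h h.length c + 1) ≤ fuel := by
        rw [List.length_set]; omega
      have := ih (h.set pos (hget h (minChild h h.length c)))
        (minChild h h.length c) (2 * minChild h h.length c + 1) hmeas
        (by rw [List.length_set]; exact hc'lt) rfl ha' hb'
      simp only [List.length_set] at this
      obtain ⟨t1, t2, t3, t4, t5⟩ := this
      refine ⟨t1, t2, t3, t4, fun y => (t5 y).trans ?_⟩
      exact set_set_perm h pos (minChild h h.length c) y hlen hc'lt (by omega)
    · -- base: the hole reached a position without children
      exact ⟨rfl, hlen, by omega, fun i j hcij hj hip => ha i j hcij hj hip,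
        fun y => List.Perm.refl _⟩

theorem hget_dropLast (h : List String) (k : Nat) (hk : k < h.length - 1) :
    hget h.dropLast k = hget h k := by
  have hk' : k < h.dropLast.length := by simp [List.length_dropLast]; omega
  have hk'' : k < h.length := by omega
  rw [hget, hget, List.getD_eq_getElem?_getD, List.getD_eq_getElem?_getD,
    List.getElem?_eq_getElem hk', List.getElem?_eq_getElem hk'']
  simp [List.getElem_dropLast]

theorem hget_last (h : List String) (hne : h ≠ []) :
    hget h (h.length - 1) = h.getLast hne := by
  have hl : h.length - 1 < h.length := by
    have := List.length_pos_iff.mpr hne; omega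
  simp [hget, List.getD_eq_getElem?_getD, List.getElem?_eq_getElem hl,
    List.getLast_eq_getElem]

theorem siftup_spec (h : List String) (hlen : 0 < h.length)
    (ha : ∀ i j, isChild i j → j < h.length → i ≠ 0 → hget h i ≤ hget h j) :
    heapProp (siftup h 0) ∧ (siftup h 0).Perm h := by
  obtain ⟨t1, t2, t3, t4, t5⟩ := siftupLoop_spec h.length h 0 (2 * 0 + 1)
    (by omega) hlen rfl ha (fun h0 => absurd h0 (lt_irrefl 0))
  obtain ⟨f1, f2⟩ := siftdownLoop_spec (hget h 0)
    (siftupLoop h.length h h.length 0 (2 * 0 + 1)).2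
    ((siftupLoop h.length h h.length 0 (2 * 0 + 1)).1.set
      (siftupLoop h.length h h.length 0 (2 * 0 + 1)).2 (hget h 0))
    (siftupLoop h.length h h.length 0 (2 * 0 + 1)).2 (le_refl _)
    (by rw [List.length_set, t1]; exact t2)
    (by
      intro i j hc hj hjne
      simp only [List.set_set] at hj ⊢
      rw [List.length_set, t1] at hj
      by_cases hiq : i = (siftupLoop h.length h h.length 0 (2 * 0 + 1)).2
      · exfalso; unfold isChild at hc; omega
      · rw [hget_set_ne _ _ _ _ hiq, hget_set_ne _ _ _ _ hjne]
        exact t4 i j hc hj hiq)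
    (by
      intro h0 c hc hcl
      simp only [List.length_set, t1] at hcl
      exfalso; unfold isChild at hc; omega)
  have hid : h.set 0 (hget h 0) = h := by
    have h0 : 0 < h.length := hlen
    rw [hget, List.getD_eq_getElem?_getD, List.getElem?_eq_getElem h0]
    simp
  constructor
  · simp only [siftup]; exact f1
  · simp only [siftup]
    refine f2.trans ?_
    simp only [List.set_set]
    refine (t5 (hget h 0)).trans ?_
    rw [hid]

theorem heappop_spec (h : List String) (hne : h ≠ []) (hp : heapProp h) :
    (heappop h).1 = hget h 0 ∧ heapProp (heappop h).2 ∧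
      ((heappop h).1 :: (heappop h).2).Perm h := by
  unfold heappop
  split_ifs with hdl
  · -- the heap had a single element
    obtain ⟨a, rfl⟩ : ∃ a, h = [a] := by
      cases h with
      | nil => simp at hne
      | cons a t =>
        cases t with
        | nil => exact ⟨a, rfl⟩
        | cons b t => simp at hdl
    refine ⟨rfl, ?_, List.Perm.refl _⟩
    intro i j _ hj
    simp at hj
  · -- pop the last element, move it to the root and sift it down
    have hL2 : 2 ≤ h.length := by
      cases h with
      | nil => simp at hne
      | cons a t =>
        cases t with
        | nil => simp at hdl
        | cons b t => simp
    have hrl : h.dropLast.length = h.length - 1 := List.length_dropLast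
    have hr0 : 0 < h.dropLast.length := by omega
    have hrl' : (h.dropLast.set 0 (hget h (h.length - 1))).length = h.length - 1 := by
      rw [List.length_set]; exact hrl
    have ha : ∀ i j, isChild i j → j < (h.dropLast.set 0 (hget h (h.length - 1))).length →
        i ≠ 0 → hget (h.dropLast.set 0 (hget h (h.length - 1))) i ≤
          hget (h.dropLast.set 0 (hget h (h.length - 1))) j := by
      intro i j hc hj hi0
      rw [hrl'] at hj
      have hj0 : j ≠ 0 := by unfold isChild at hc; omega
      have hij : i < j := by unfold isChild at hc; omega
      rw [hget_set_ne _ _ _ _ hi0, hget_set_ne _ _ _ _ hj0,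
        hget_dropLast _ _ (by omega), hget_dropLast _ _ (by omega)]
      exact hp i j hc (by omega)
    obtain ⟨f1, f2⟩ := siftup_spec (h.dropLast.set 0 (hget h (h.length - 1)))
      (by omega) ha
    refine ⟨hget_dropLast h 0 (by omega), f1, ?_⟩
    have hset0 : hget (h.dropLast.set 0 (hget h (h.length - 1))) 0
        = hget h (h.length - 1) := hget_set_self _ _ _ hr0
    refine ((f2.cons _).trans ?_)
    refine ((cons_getD_set_perm h.dropLast 0 (hget h (h.length - 1)) hr0).trans ?_)
    rw [hget_last h hne]
    exact ((List.perm_append_singleton _ _).symm).trans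
      (by rw [List.dropLast_append_getLast hne])

theorem heap_root_le_mem (h : List String) (hp : heapProp h) :
    ∀ y ∈ h, hget h 0 ≤ y := by
  intro y hy
  obtain ⟨j, hj, rfl⟩ := List.mem_iff_getElem.mp hy
  have h1 := heap_root_le h hp j hj
  have h2 : hget h j = h[j] := by
    simp [hget, List.getD_eq_getElem?_getD, List.getElem?_eq_getElem hj]
  rwa [h2] at h1

theorem popAll_spec : ∀ (fuel : Nat) (h : List String), h.length ≤ fuel → heapProp h →
    (popAll fuel h).Perm h ∧ (popAll fuel h).Pairwise (· ≤ ·) := by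
  intro fuel
  induction fuel with
  | zero =>
    intro h hn hp
    have : h = [] := by cases h <;> simp_all
    subst this
    exact ⟨List.Perm.refl _, List.Pairwise.nil⟩
  | succ fuel ih =>
    intro h hn hp
    simp only [popAll]
    split_ifs with he
    · have : h = [] := List.isEmpty_iff.mp he
      subst this
      exact ⟨List.Perm.refl _, List.Pairwise.nil⟩
    · have hne : h ≠ [] := by simpa [List.isEmpty_iff] using he
      have hlen1 : (heappop h).2.length + 1 = h.length := length_heappop h he
      obtain ⟨p1, p2, p3⟩ := heappop_spec h hne hp
      obtain ⟨q1, q2⟩ := ih _ (by omega) p2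
      refine ⟨(q1.cons _).trans p3, List.pairwise_cons.mpr ⟨?_, q2⟩⟩
      intro y hy
      have hyh : y ∈ h := p3.mem_iff.mp (List.mem_cons_of_mem _ (q1.mem_iff.mp hy))
      rw [p1]
      exact heap_root_le_mem h hp y hyh

theorem pushAll_aux (l : List String) : ∀ (h0 : List String), heapProp h0 →
    heapProp (l.foldl (fun hp item => heappush hp item) h0) ∧
      (l.foldl (fun hp item => heappush hp item) h0).Perm (h0 ++ l) := by
  induction l with
  | nil => intro h0 hp; refine ⟨hp, ?_⟩; simp
  | cons x l ih =>
    intro h0 hp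
    obtain ⟨w1, w2⟩ := heappush_spec h0 x hp
    obtain ⟨v1, v2⟩ := ih (heappush h0 x) w1
    refine ⟨v1, v2.trans ?_⟩
    have := w2.append_right l
    simpa using this

theorem pushAll_spec (l : List String) :
    heapProp (l.foldl (fun hp item => heappush hp item) []) ∧
      (l.foldl (fun hp item => heappush hp item) []).Perm l := by
  have h0 : heapProp ([] : List String) := by intro i j _ hj; simp at hj
  simpa using pushAll_aux l [] h0

-- ===== VERDICT (by name: the statement is the Claim_ definition above) =====
theorem toTreeMap_spec : Claim_equal_toTreeMap := by
  intro paramMap _hdom hpre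
  unfold Spec_toTreeMap
  simp only [toTreeMap, toTreeMap_alt]
  have hkeys : (PySem.Dict.mk paramMap).keys.Nodup := by
    simpa [PySem.Dict.keys_mk] using hpre
  obtain ⟨hH, hPerm⟩ := pushAll_spec (PySem.Dict.mk paramMap).keys
  obtain ⟨s1, s2⟩ := popAll_spec
    ((PySem.Dict.mk paramMap).keys.foldl (fun hp item => heappush hp item) []).length
    _ (le_refl _) hH
  have hsortperm : (popAll
      ((PySem.Dict.mk paramMap).keys.foldl (fun hp item => heappush hp item) []).length
      ((PySem.Dict.mk paramMap).keys.foldl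
        (fun hp item => heappush hp item) [])).Perm (PySem.Dict.mk paramMap).keys :=
    s1.trans hPerm
  have hnd : (popAll
      ((PySem.Dict.mk paramMap).keys.foldl (fun hp item => heappush hp item) []).length
      ((PySem.Dict.mk paramMap).keys.foldl
        (fun hp item => heappush hp item) [])).Nodup := hsortperm.nodup_iff.mpr hkeys
  have hlt : (popAll
      ((PySem.Dict.mk paramMap).keys.foldl (fun hp item => heappush hp item) []).length
      ((PySem.Dict.mk paramMap).keys.foldl
        (fun hp item => heappush hp item) [])).Pairwise (· < ·) := by
    have := s2.and hnd
    exact this.imp (fun hab => lt_of_le_of_ne hab.1 hab.2)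
  have hsorted : PySem.List.sorted (PySem.Dict.mk paramMap).keys (fun k => k) false =
      popAll
        ((PySem.Dict.mk paramMap).keys.foldl (fun hp item => heappush hp item) []).length
        ((PySem.Dict.mk paramMap).keys.foldl (fun hp item => heappush hp item) []) :=
    PySem.List.sorted_eq_of_perm_of_pairwise_lt _ _ (fun k => k) hsortperm hlt
  rw [hsorted]
  rw [PySem.Dict.items_foldl_insert_fresh]
  · simp [PySem.Dict.empty]
  · intro a _
    exact PySem.Dict.contains_empty a
  · simpa using hnd
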